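-- pv_equiv track=rewrite | github.com/envomp/2019-Logical-Programming | pr14_exam/test_exam.py | __solver_sum_between_25
-- ===== SOURCE A (Python) =====
-- def __solver_sum_between_25(numbers):
--     do_count = False
--     total = 0
--     for num in numbers:
--         if num == 2 and not do_count:
--             do_count = True
--         elif num == 5:
--             do_count = False
--         elif do_count:
--             total += num
--     return total
-- ===== SOURCE B (Python) =====
-- def __solver_sum_between_25(numbers):
--     total = 0
--     it = iter(numbers)
--     for num in it:
--         if num == 2:
--             for num2 in it:
--                 if num2 == 5:
--                     break
--                 total += num2
--     return total
-- ===== Notes on version B (the rewrite author's own statement) =====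
-- stated objective: alternative
-- what changed: Replaced the do_count boolean flag state machine by nested iteration over a single shared iterator: the outer loop scans for a 2, an inner loop over the same iterator sums every element until a 5.
import Mathlib
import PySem

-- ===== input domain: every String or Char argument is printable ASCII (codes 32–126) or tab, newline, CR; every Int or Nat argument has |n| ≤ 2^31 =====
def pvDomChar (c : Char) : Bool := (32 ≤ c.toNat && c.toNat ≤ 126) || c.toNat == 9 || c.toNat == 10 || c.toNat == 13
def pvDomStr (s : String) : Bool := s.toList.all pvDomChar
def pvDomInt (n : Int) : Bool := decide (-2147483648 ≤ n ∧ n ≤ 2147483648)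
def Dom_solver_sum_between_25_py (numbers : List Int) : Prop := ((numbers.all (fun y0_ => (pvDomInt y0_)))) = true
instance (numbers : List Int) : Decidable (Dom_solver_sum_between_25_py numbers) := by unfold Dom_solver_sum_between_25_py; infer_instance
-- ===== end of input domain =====

-- B replaces A's do_count flag state machine by nested recursion over one shared list tail (alternative decomposition; same O(n) cost).

-- ===== PORT A =====
def aStep (st : Bool × Int) (num : Int) : Bool × Int :=
  if num == 2 && !st.1 then (true, st.2)
  else if num == 5 then (false, st.2)
  else if st.1 then (st.1, st.2 + num)
  else st

def solver_sum_between_25_py (numbers : List Int) : Int :=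
  (numbers.foldl aStep (false, 0)).2

-- ===== PORT B =====
-- inner loop: sum elements of the shared iterator until a 5; returns (total, remaining tail)
def altInner (total : Int) : List Int → Int × List Int
  | [] => (total, [])
  | x :: xs => if x == 5 then (total, xs) else altInner (total + x) xs

-- needed for altOuter's termination
theorem altInner_len (total : Int) (xs : List Int) : (altInner total xs).2.length ≤ xs.length := by
  induction xs generalizing total with
  | nil => simp [altInner]
  | cons x xs ih =>
    by_cases h : x = 5
    · simp [altInner, h]
    · simpa [altInner, h] using Nat.le_succ_of_le (ih (total + x))

-- outer loop: scan the shared iterator for a 2, then run the inner loop and continue on its leftover tail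
def altOuter (total : Int) : List Int → Int
  | [] => total
  | x :: xs =>
    if x == 2 then
      altOuter (altInner total xs).1 (altInner total xs).2
    else altOuter total xs
termination_by xs => xs.length
decreasing_by
  · exact Nat.lt_succ_of_le (altInner_len total xs)
  · exact Nat.lt_succ_self _

def solver_sum_between_25_py_alt (numbers : List Int) : Int := altOuter 0 numbers

-- ===== PRECONDITION & SPEC =====
def Spec_solver_sum_between_25_py (numbers : List Int) (out : Int) : Prop := out = solver_sum_between_25_py_alt numbers
instance (numbers : List Int) (out : Int) : Decidable (Spec_solver_sum_between_25_py numbers out) := by unfold Spec_solver_sum_between_25_py; infer_instance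

-- ===== CLAIM (what is proved, stated in full; the proofs are below) =====
def Claim_equal_solver_sum_between_25_py : Prop := ∀ (numbers : List Int), Dom_solver_sum_between_25_py numbers → Spec_solver_sum_between_25_py numbers (solver_sum_between_25_py numbers)

-- ===== LEMMAS AND PROOFS =====
-- state False of A's fold corresponds to altOuter; state True to the inner loop followed by altOuter
theorem fold_both (xs : List Int) : ∀ total : Int,
    (List.foldl aStep (false, total) xs).2 = altOuter total xs ∧
    (List.foldl aStep (true, total) xs).2 =
      altOuter (altInner total xs).1 (altInner total xs).2 := by
  induction xs with
  | nil => intro t; simp [altOuter, altInner]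
  | cons x xs ih =>
    intro t
    constructor
    · by_cases h2 : x = 2
      · subst h2
        simpa [aStep, altOuter] using (ih t).2
      · by_cases h5 : x = 5 <;>
          simpa [aStep, altOuter, h2, h5] using (ih t).1
    · by_cases h5 : x = 5
      · subst h5
        simpa [aStep, altInner] using (ih t).1
      · simpa [aStep, altInner, h5] using (ih (t + x)).2

-- ===== VERDICT (by name: the statement is the Claim_ definition above) =====
theorem solver_sum_between_25_py_spec : Claim_equal_solver_sum_between_25_py := by
  intro numbers _
  unfold Spec_solver_sum_between_25_py solver_sum_between_25_py solver_sum_between_25_py_alt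
  exact (fold_both numbers 0).1
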